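-- pv_equiv track=rewrite | github.com/ArunGiri392/FamousCodingInterviewQuestions | removeduplicatesfromsortedarray.py | noofwords
-- ===== SOURCE A (Python) =====
-- def noofwords(string):
--     is_space = False
--     count = 0
--     for element in range(len(string)-1, -1,-1):
--         if string[element] != " ":
--             is_space = True
--         if string[element] == " "  and is_space == True:
--             count += 1
--             is_space = False
--
--     return count + 1
-- ===== SOURCE B (Python) =====
-- def noofwords(string):
--     return 1 + sum(1 for x, y in zip(string, string[1:]) if x == ' ' and y != ' ')
-- ===== Notes on version B (the rewrite author's own statement) =====
-- stated objective: simpler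
-- what changed: A's stateful right-to-left index loop with an is_space flag is replaced by a stateless one-liner that counts adjacent character pairs (space followed by non-space) over zip(string, string[1:]).
import Mathlib
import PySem

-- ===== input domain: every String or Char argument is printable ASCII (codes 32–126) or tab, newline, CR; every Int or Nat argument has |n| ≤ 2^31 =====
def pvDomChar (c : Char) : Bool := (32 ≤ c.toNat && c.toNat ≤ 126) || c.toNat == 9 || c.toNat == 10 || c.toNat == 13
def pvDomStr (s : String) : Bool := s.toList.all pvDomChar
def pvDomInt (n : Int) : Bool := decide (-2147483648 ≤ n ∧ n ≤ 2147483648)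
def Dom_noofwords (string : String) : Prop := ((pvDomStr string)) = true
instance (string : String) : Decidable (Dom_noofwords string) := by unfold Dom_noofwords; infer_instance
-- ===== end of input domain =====

-- B replaces A's stateful right-to-left index loop by a stateless count of adjacent
-- (space, non-space) character pairs; objective: simpler (no speed claim).

-- ===== PORT A =====
-- the loop body: first 'if' updates is_space, second 'if' (with the updated is_space) counts.
-- string[element] is ported as PySem.List.pyGetD string.toList element ' '; every index the
-- range produces is in bounds, so the default is never used (exact on all inputs).
def noofwordsStep (st : Bool × Int) (c : Char) : Bool × Int :=
  let is_space := if !(c == ' ') then true else st.1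
  if c == ' ' && is_space then (false, st.2 + 1) else (is_space, st.2)

def noofwords (string : String) : Int :=
  let r := (PySem.List.pyRange (PySem.Str.len string - 1) (-1) (-1)).foldl
      (fun (st : Bool × Int) element => noofwordsStep st (PySem.List.pyGetD string.toList element ' '))
      (false, 0)
  r.2 + 1

-- ===== PORT B =====
def noofwords_alt (string : String) : Int :=
  1 + (((string.toList).zip ((PySem.Str.slice string (some 1) none).toList)).countP
        (fun p => p.1 == ' ' && !(p.2 == ' ')) : Int)

-- ===== PRECONDITION & SPEC =====
def Spec_noofwords (string : String) (out : Int) : Prop := out = noofwords_alt string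
instance (string : String) (out : Int) : Decidable (Spec_noofwords string out) := by unfold Spec_noofwords; infer_instance

-- ===== CLAIM (what is proved, stated in full; the proofs are below) =====
def Claim_equal_noofwords : Prop := ∀ (string : String), Dom_noofwords string → Spec_noofwords string (noofwords string)

-- ===== LEMMAS AND PROOFS =====

-- the pair-count B computes, on the list side
def pvPairs (l : List Char) : Int :=
  ((l.zip l.tail).countP (fun p => p.1 == ' ' && !(p.2 == ' ')) : Int)

-- head flag: after A's loop, is_space equals "the leftmost char is a non-space"
def pvHead (l : List Char) : Bool :=
  match l with
  | [] => false
  | c :: _ => !(c == ' ')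

-- A's right-to-left loop, expressed as a foldr over the character list, computes
-- exactly (pvHead l, pvPairs l).
theorem noofwords_foldr (l : List Char) :
    l.foldr (fun c acc => noofwordsStep acc c) (false, 0) = (pvHead l, pvPairs l) := by
  induction l with
  | nil => simp [pvHead, pvPairs]
  | cons c l ih =>
    rw [List.foldr_cons, ih]
    cases l with
    | nil =>
      by_cases hc : c = ' ' <;> simp [noofwordsStep, pvHead, pvPairs, hc]
    | cons d l' =>
      by_cases hc : c = ' '
      · by_cases hd : d = ' ' <;>
          simp [noofwordsStep, pvHead, pvPairs, hc, hd]
      · by_cases hd : d = ' ' <;>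
          simp [noofwordsStep, pvHead, pvPairs, hc, hd]

-- ===== VERDICT (by name: the statement is the Claim_ definition above) =====
theorem noofwords_spec : Claim_equal_noofwords := by
  intro s _
  unfold Spec_noofwords noofwords noofwords_alt
  have hrange : PySem.List.pyRange (PySem.Str.len s - 1) (-1) (-1)
      = (PySem.List.pyRange 0 (PySem.Str.len s) 1).reverse := by
    have := PySem.List.pyRange_neg_one_eq_reverse (PySem.Str.len s - 1) (-1)
    simpa using this
  rw [hrange, List.foldl_reverse]
  have hmap : (PySem.List.pyRange 0 (PySem.Str.len s) 1).map
      (fun j => PySem.List.pyGetD s.toList j ' ') = s.toList := by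
    simpa [PySem.Str.len] using PySem.List.map_pyGetD_pyRange_zero' s.toList ' '
  have hfr : (PySem.List.pyRange 0 (PySem.Str.len s) 1).foldr
      (fun j acc => noofwordsStep acc (PySem.List.pyGetD s.toList j ' ')) (false, 0)
      = s.toList.foldr (fun c acc => noofwordsStep acc c) (false, 0) := by
    conv_rhs => rw [← hmap]
    exact (List.foldr_map (f := fun j => PySem.List.pyGetD s.toList j ' ') (g := fun c acc => noofwordsStep acc c)).symm
  rw [hfr, noofwords_foldr]
  have hslice : (PySem.Str.slice s (some 1) none).toList = s.toList.tail := by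
    simp [PySem.Str.slice, PySem.List.slice_from_one]
  rw [hslice]
  simp [pvPairs]
  ring
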